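-- pv_equiv track=rewrite | github.com/pypi-data/pypi-mirror-382 | packages/graph-sitter/graph_sitter-0.56.14-cp313-cp313-macosx_11_0_arm64.whl/graph_sitter/extensions/swebench/tests.py | remove_patches_to_tests
-- ===== SOURCE A (Python) =====
-- def remove_patches_to_tests(model_patch):
--     """Remove any changes to the tests directory from the provided patch.
--     This is to ensure that the model_patch does not disturb the repo's
--     tests when doing acceptance testing with the `test_patch`.
--     """
--     if not model_patch:
--         return model_patch
--
--     lines = model_patch.splitlines(keepends=True)
--     filtered_lines = []
--     is_tests = False
--
--     for line in lines:
--         if line.startswith("diff --git a/"):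
--             pieces = line.split()
--             to = pieces[-1]
--             if to.startswith("b/") and ("/test/" in to or "/tests/" in to or "/testing/" in to or "/test_" in to or "/tox.ini" in to):
--                 is_tests = True
--             else:
--                 is_tests = False
--
--         if not is_tests:
--             filtered_lines.append(line)
--
--     return "".join(filtered_lines)
-- ===== SOURCE B (Python) =====
-- def remove_patches_to_tests(model_patch):
--     """Remove any changes to the tests directory from the provided patch.
--     Segment-based: partition lines into per-file diff segments, then drop
--     whole test segments."""
--     if not model_patch:
--         return model_patch
--
--     lines = model_patch.splitlines(keepends=True)
--
--     # partition into segments: a headerless preamble, then one segment per header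
--     segments = []
--     cur = []
--     for line in lines:
--         if line.startswith("diff --git a/"):
--             if cur:
--                 segments.append(cur)
--             cur = [line]
--         else:
--             cur.append(line)
--     segments.append(cur)
--
--     def _keeps(seg):
--         head = seg[0]
--         if head.startswith("diff --git a/"):
--             to = head.split()[-1]
--             return not (to.startswith("b/") and ("/test/" in to or "/tests/" in to or "/testing/" in to or "/test_" in to or "/tox.ini" in to))
--         return True
--
--     return "".join(line for seg in segments if _keeps(seg) for line in seg)
-- ===== Notes on version B (the rewrite author's own statement) =====
-- stated objective: alternative
-- what changed: Replaces the per-line is_tests flag sweep by partitioning the patch into per-file diff segments and dropping whole test-header segments, concatenating the kept segments.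
import Mathlib
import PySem

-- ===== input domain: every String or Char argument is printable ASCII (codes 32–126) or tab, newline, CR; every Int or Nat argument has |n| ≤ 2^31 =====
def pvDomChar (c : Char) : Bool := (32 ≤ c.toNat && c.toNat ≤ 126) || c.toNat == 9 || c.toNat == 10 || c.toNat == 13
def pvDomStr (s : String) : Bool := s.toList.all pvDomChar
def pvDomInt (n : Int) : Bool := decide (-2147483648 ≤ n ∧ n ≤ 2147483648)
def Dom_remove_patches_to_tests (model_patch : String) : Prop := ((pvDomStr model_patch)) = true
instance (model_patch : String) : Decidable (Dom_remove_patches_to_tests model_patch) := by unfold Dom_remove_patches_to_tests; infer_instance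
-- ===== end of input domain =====

-- B replaces A's per-line is_tests flag sweep by partitioning the patch into per-file
-- diff segments and dropping whole test segments (objective: alternative decomposition).

-- splitlines(keepends=True), exact on the domain (line breaks there are \n, \r, \r\n)
def pyLinesKE : List Char → List (List Char)
  | [] => []
  | '\r' :: '\n' :: rest => ['\r', '\n'] :: pyLinesKE rest
  | '\r' :: rest => ['\r'] :: pyLinesKE rest
  | '\n' :: rest => ['\n'] :: pyLinesKE rest
  | c :: rest =>
    match pyLinesKE rest with
    | [] => [[c]]
    | l :: ls => (c :: l) :: ls

-- line.startswith("diff --git a/")  (shared literal check, identical in both Pythons)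
def pvIsHeader (line : List Char) : Bool :=
  PySem.Chars.startswith line "diff --git a/".toList

-- the test-path check both Pythons apply to a header line:
-- to = line.split()[-1]; to.startswith("b/") and (… in to or …)
-- (pieces is never empty on a header line, so the [-1] default is unreachable)
def pvIsTestHeader (line : List Char) : Bool :=
  let pieces := PySem.Chars.split₀ line
  let tok := (PySem.List.pyGet? pieces (-1)).getD []
  PySem.Chars.startswith tok "b/".toList &&
    (PySem.Chars.isIn "/test/".toList tok || PySem.Chars.isIn "/tests/".toList tok ||
     PySem.Chars.isIn "/testing/".toList tok || PySem.Chars.isIn "/test_".toList tok ||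
     PySem.Chars.isIn "/tox.ini".toList tok)

-- ===== PORT A =====
-- loop body of A: state = (is_tests, filtered_lines)
def pvStepA (st : Bool × List (List Char)) (line : List Char) : Bool × List (List Char) :=
  let is_tests := if pvIsHeader line then pvIsTestHeader line else st.1
  (is_tests, if is_tests then st.2 else st.2 ++ [line])

def remove_patches_to_tests (model_patch : String) : String :=
  if model_patch.toList = [] then model_patch  -- if not model_patch: return model_patch
  else
    let lines := pyLinesKE model_patch.toList
    let res := lines.foldl pvStepA (false, [])
    String.ofList res.2.flatten  -- "".join(filtered_lines)

-- ===== PORT B =====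
-- loop body of B: state = (segments, cur)
def pvStepB (st : List (List (List Char)) × List (List Char)) (line : List Char) :
    List (List (List Char)) × List (List Char) :=
  if pvIsHeader line then
    (if st.2 ≠ [] then st.1 ++ [st.2] else st.1, [line])
  else (st.1, st.2 ++ [line])

-- _keeps(seg): seg is always nonempty; the [] branch is unreachable
def pvKeeps (seg : List (List Char)) : Bool :=
  match seg with
  | [] => true
  | head :: _ => if pvIsHeader head then !pvIsTestHeader head else true

def remove_patches_to_tests_alt (model_patch : String) : String :=
  if model_patch.toList = [] then model_patch  -- if not model_patch: return model_patch
  else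
    let lines := pyLinesKE model_patch.toList
    let st := lines.foldl pvStepB ([], [])
    let segments := st.1 ++ [st.2]
    String.ofList ((segments.filter pvKeeps).flatten.flatten)  -- "".join over kept segments

-- ===== PRECONDITION & SPEC =====
def Spec_remove_patches_to_tests (model_patch : String) (out : String) : Prop := out = remove_patches_to_tests_alt model_patch
instance (model_patch : String) (out : String) : Decidable (Spec_remove_patches_to_tests model_patch out) := by unfold Spec_remove_patches_to_tests; infer_instance

-- ===== CLAIM (what is proved, stated in full; the proofs are below) =====
def Claim_equal_remove_patches_to_tests : Prop := ∀ (model_patch : String), Dom_remove_patches_to_tests model_patch → Spec_remove_patches_to_tests model_patch (remove_patches_to_tests model_patch)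

-- ===== LEMMAS AND PROOFS =====

-- recursive characterisation of A's filtered lines, given the incoming is_tests flag
def pvFA : Bool → List (List Char) → List (List Char)
  | _, [] => []
  | b, l :: rest =>
    if pvIsHeader l then
      (if pvIsTestHeader l then pvFA true rest else l :: pvFA false rest)
    else
      (if b then pvFA b rest else l :: pvFA b rest)

theorem pvFoldA (lines : List (List Char)) : ∀ (b : Bool) (acc : List (List Char)),
    (lines.foldl pvStepA (b, acc)).2 = acc ++ pvFA b lines := by
  induction lines with
  | nil => intro b acc; simp [pvFA]
  | cons l rest ih =>
    intro b acc
    simp only [List.foldl_cons, pvStepA, pvFA]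
    by_cases h : pvIsHeader l = true
    · by_cases hb : pvIsTestHeader l = true <;> simp [h, hb, ih]
    · by_cases hb : b = true <;> simp [h, hb, ih]

theorem pvKeeps_append (cur : List (List Char)) (l : List Char) (h : cur ≠ []) :
    pvKeeps (cur ++ [l]) = pvKeeps cur := by
  cases cur with
  | nil => exact absurd rfl h
  | cons a t => simp [pvKeeps]

theorem pvFlatten_filter_append (segs : List (List (List Char))) (s : List (List Char)) :
    ((segs ++ [s]).filter pvKeeps).flatten
      = (segs.filter pvKeeps).flatten ++ (if pvKeeps s then s else []) := by
  by_cases h : pvKeeps s = true <;> simp [List.filter_append, h]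

-- the segmentation invariant: folding B's loop from (segs, cur) with cur ≠ []
theorem pvFoldB (lines : List (List Char)) :
    ∀ (segs : List (List (List Char))) (cur : List (List Char)), cur ≠ [] →
    (((lines.foldl pvStepB (segs, cur)).1 ++ [(lines.foldl pvStepB (segs, cur)).2]).filter pvKeeps).flatten
      = (segs.filter pvKeeps).flatten ++ (if pvKeeps cur then cur else [])
          ++ pvFA (!pvKeeps cur) lines := by
  induction lines with
  | nil =>
    intro segs cur _
    simp only [List.foldl_nil, pvFA, List.append_nil]
    rw [pvFlatten_filter_append]
  | cons l rest ih =>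
    intro segs cur hcur
    simp only [List.foldl_cons, pvStepB]
    by_cases h : pvIsHeader l = true
    · simp only [h, if_pos, hcur, ne_eq, not_false_iff]
      rw [ih (segs ++ [cur]) [l] (by simp)]
      rw [pvFlatten_filter_append]
      have hk : pvKeeps [l] = !pvIsTestHeader l := by simp [pvKeeps, h]
      by_cases hb : pvIsTestHeader l = true <;> simp [pvFA, h, hb, hk]
    · simp only [h, Bool.false_eq_true, if_false]
      rw [ih segs (cur ++ [l]) (by simp)]
      rw [pvKeeps_append cur l hcur]
      by_cases hc : pvKeeps cur = true <;> simp [pvFA, h, hc]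

theorem pvMain (lines : List (List Char)) :
    (lines.foldl pvStepA (false, [])).2
      = (((lines.foldl pvStepB ([], [])).1 ++ [(lines.foldl pvStepB ([], [])).2]).filter pvKeeps).flatten := by
  cases lines with
  | nil => simp [pvKeeps]
  | cons l rest =>
    rw [pvFoldA]
    -- the first step of B from ([], []) always yields ([], [l]) (cur is empty)
    have hstep : pvStepB ([], []) l = ([], [l]) := by
      by_cases h : pvIsHeader l = true <;> simp [pvStepB, h]
    simp only [List.foldl_cons, hstep]
    rw [pvFoldB rest [] [l] (by simp)]
    by_cases h : pvIsHeader l = true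
    · by_cases hb : pvIsTestHeader l = true <;> simp [pvFA, h, hb, pvKeeps]
    · simp [pvFA, h, pvKeeps]

-- ===== VERDICT (by name: the statement is the Claim_ definition above) =====
theorem remove_patches_to_tests_spec : Claim_equal_remove_patches_to_tests := by
  intro mp _
  unfold Spec_remove_patches_to_tests remove_patches_to_tests remove_patches_to_tests_alt
  by_cases h : mp.toList = []
  · simp [h]
  · simp only [h, if_false]
    rw [pvMain]
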